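-- pv_equiv track=rewrite | github.com/pypi-data/pypi-mirror-385 | packages/ili2c-python/ili2c_python-0.2.0-py3-none-any.whl/ili2c/pyili2c/parser/core.py | _collapse_ws_outside_strings
-- ===== SOURCE A (Python) =====
-- from typing import Dict, Iterable, List, Optional, Sequence, Tuple
--
-- def _collapse_ws_outside_strings(text: str) -> str:
--     result: List[str] = []
--     in_string = False
--     escape = False
--     quote_char = ""
--     for ch in text:
--         if in_string:
--             result.append(ch)
--             if escape:
--                 escape = False
--             elif ch == "\\":
--                 escape = True
--             elif ch == quote_char:
--                 in_string = False
--         else: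
--             if ch in {"'", '"'}:
--                 in_string = True
--                 quote_char = ch
--                 result.append(ch)
--             elif ch.isspace():
--                 continue
--             else:
--                 result.append(ch)
--     return "".join(result)
-- ===== SOURCE B (Python) =====
-- def _collapse_ws_outside_strings(text: str) -> str:
--     # Chunked scan: alternate between a quote-free segment (whitespace filtered
--     # out in one slice pass) and a quoted literal copied verbatim as a slice.
--     n = len(text)
--     parts = []
--     i = 0
--     while i < n:
--         j = i
--         while j < n and text[j] not in "'\"":
--             j += 1
--         parts.append(''.join(c for c in text[i:j] if not c.isspace()))
--         if j == n:
--             break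
--         q = text[j]
--         k = j + 1
--         while k < n:
--             c = text[k]
--             k += 1
--             if c == '\\':
--                 k += 1
--             elif c == q:
--                 break
--         k = min(k, n)
--         parts.append(text[j:k])
--         i = k
--     return ''.join(parts)
-- ===== Notes on version B (the rewrite author's own statement) =====
-- stated objective: alternative
-- what changed: Replaces the per-character state machine (in_string/escape/quote_char flags updated on every char) with a chunked tokenizer: an outer loop alternating between a quote-free segment, whose whitespace is filtered out in one pass, and a quoted literal located by a dedicated closing-quote scan (skipping escaped chars) and copied verbatim as a slice.
import Mathlib
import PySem

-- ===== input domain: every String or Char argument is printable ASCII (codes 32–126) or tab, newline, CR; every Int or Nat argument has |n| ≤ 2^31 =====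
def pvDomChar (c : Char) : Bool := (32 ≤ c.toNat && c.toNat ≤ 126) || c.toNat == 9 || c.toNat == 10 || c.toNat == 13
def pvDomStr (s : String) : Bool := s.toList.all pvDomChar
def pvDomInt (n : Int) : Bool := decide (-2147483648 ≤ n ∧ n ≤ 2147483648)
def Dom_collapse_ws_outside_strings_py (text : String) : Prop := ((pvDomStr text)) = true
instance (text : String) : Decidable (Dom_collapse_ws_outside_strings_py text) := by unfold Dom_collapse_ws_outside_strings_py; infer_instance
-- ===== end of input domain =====

-- B replaces A's per-character state machine by a chunked tokenizer (quote-free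
-- segment filtered in one pass, quoted literal copied verbatim); alternative, same cost.


-- ===== PORT A =====
-- Python's quote_char starts as ""; it is never compared before a quote is seen
-- (only the in_string branch reads it), so a placeholder ' ' Char is faithful.
def aStep (st : List Char × Bool × Bool × Char) (ch : Char) : List Char × Bool × Bool × Char :=
  match st with
  | (result, in_string, escape, quote) =>
    if in_string then
      let result := result ++ [ch]
      if escape then (result, true, false, quote)
      else if ch = '\\' then (result, true, true, quote)
      else if ch = quote then (result, false, false, quote)
      else (result, true, false, quote)
    else
      if ch = '\'' ∨ ch = '"' then (result ++ [ch], true, false, ch)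
      else if PySem.Chars.isspace ch then (result, in_string, escape, quote)
      else (result ++ [ch], in_string, escape, quote)

def collapse_ws_outside_strings_py (text : String) : String :=
  String.mk (text.toList.foldl aStep ([], false, false, ' ')).1

-- ===== PORT B =====
-- the closing-quote scan of Source B's inner while-loop: returns the verbatim chars
-- after the opening quote (up to and including the closing quote, escaped chars
-- skipped) together with the remaining text
def bFindClose (q : Char) : List Char → List Char × List Char
  | [] => ([], [])
  | c :: rest =>
    if c = '\\' then
      match rest with
      | [] => ([c], [])
      | d :: rest' => let p := bFindClose q rest'; (c :: d :: p.1, p.2)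
    else if c = q then ([c], rest)
    else let p := bFindClose q rest; (c :: p.1, p.2)

-- needed only for bGo's termination
theorem bFindClose_snd_length (q : Char) : (l : List Char) →
    (bFindClose q l).2.length ≤ l.length
  | [] => by simp [bFindClose]
  | c :: rest => by
    rw [bFindClose.eq_def]
    by_cases h1 : c = '\\'
    · cases rest with
      | nil => simp [h1]
      | cons d rest' =>
        have ih := bFindClose_snd_length q rest'
        simp [h1]; omega
    · by_cases h2 : c = q
      · subst h2; simp [h1]
      · have ih := bFindClose_snd_length q rest
        simp [h1, h2]; omega

-- Source B's outer while-loop: quote-free segment (whitespace filtered out) then a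
-- quoted literal kept verbatim, repeatedly
def bGo (cs : List Char) : List Char :=
  let pre := (cs.takeWhile fun c => !(c == '\'' || c == '"')).filter
      (fun c => !PySem.Chars.isspace c)
  match h : cs.dropWhile (fun c => !(c == '\'' || c == '"')) with
  | [] => pre
  | q :: tail =>
    let p := bFindClose q tail
    pre ++ q :: p.1 ++ bGo p.2
termination_by cs.length
decreasing_by
  have h1 : (cs.dropWhile (fun c => !(c == '\'' || c == '"'))).length ≤ cs.length :=
    (List.dropWhile_suffix _).length_le
  have h2 := bFindClose_snd_length q tail
  rw [h] at h1; simp at h1; omega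

def collapse_ws_outside_strings_py_alt (text : String) : String :=
  String.mk (bGo text.toList)

-- ===== PRECONDITION & SPEC =====
def Spec_collapse_ws_outside_strings_py (text : String) (out : String) : Prop := out = collapse_ws_outside_strings_py_alt text
instance (text : String) (out : String) : Decidable (Spec_collapse_ws_outside_strings_py text out) := by unfold Spec_collapse_ws_outside_strings_py; infer_instance

-- ===== CLAIM (what is proved, stated in full; the proofs are below) =====
def Claim_equal_collapse_ws_outside_strings_py : Prop := ∀ (text : String), Dom_collapse_ws_outside_strings_py text → Spec_collapse_ws_outside_strings_py text (collapse_ws_outside_strings_py text)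

-- ===== LEMMAS AND PROOFS =====

-- recursive characterisation of A's three states (outside a string / inside /
-- inside right after a backslash)
mutual
def outA : List Char → List Char
  | [] => []
  | c :: cs =>
    if c = '\'' ∨ c = '"' then c :: insA c cs
    else if PySem.Chars.isspace c then outA cs
    else c :: outA cs
def insA (q : Char) : List Char → List Char
  | [] => []
  | c :: cs => c :: (if c = '\\' then escA q cs else if c = q then outA cs else insA q cs)
def escA (q : Char) : List Char → List Char
  | [] => []
  | c :: cs => c :: insA q cs
end

theorem foldl_aStep_char (cs : List Char) :
    (∀ res q0, (cs.foldl aStep (res, false, false, q0)).1 = res ++ outA cs)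
    ∧ (∀ res q, (cs.foldl aStep (res, true, false, q)).1 = res ++ insA q cs)
    ∧ (∀ res q, (cs.foldl aStep (res, true, true, q)).1 = res ++ escA q cs) := by
  induction cs with
  | nil => simp [outA, insA, escA]
  | cons c cs ih =>
    obtain ⟨ihO, ihI, ihE⟩ := ih
    refine ⟨?_, ?_, ?_⟩ <;> intro res q
    · by_cases hq : c = '\'' ∨ c = '"'
      · simp [aStep, hq, ihI, outA]
      · by_cases hs : PySem.Chars.isspace c = true <;>
          simp [aStep, hq, hs, ihO, outA]
    · by_cases hb : c = '\\'
      · simp [aStep, hb, ihE, insA]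
      · by_cases hq2 : c = q
        · subst hq2; simp [aStep, hb, ihO, insA]
        · simp [aStep, hb, hq2, ihI, insA]
    · simp [aStep, ihI, escA]

theorem insA_eq_bFindClose (q : Char) : (l : List Char) →
    insA q l = (bFindClose q l).1 ++ outA (bFindClose q l).2
  | [] => by simp [insA, bFindClose, outA]
  | c :: rest => by
    rw [bFindClose.eq_def]
    by_cases h1 : c = '\\'
    · cases rest with
      | nil => simp [insA, h1, escA, outA]
      | cons d rest' =>
        have ih := insA_eq_bFindClose q rest'
        simp [insA, h1, escA, ih]
    · by_cases h2 : c = q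
      · subst h2; simp [insA, h1]
      · have ih := insA_eq_bFindClose q rest
        simp [insA, h1, h2, ih]

def restPart : List Char → List Char
  | [] => []
  | q :: tail => q :: insA q tail

theorem outA_split (cs : List Char) :
    outA cs =
      ((cs.takeWhile fun c => !(c == '\'' || c == '"')).filter
        (fun c => !PySem.Chars.isspace c))
      ++ restPart (cs.dropWhile (fun c => !(c == '\'' || c == '"'))) := by
  induction cs with
  | nil => simp [outA, restPart]
  | cons c cs ih =>
    by_cases hq : c = '\'' ∨ c = '"'
    · rcases hq with h | h <;> subst h <;>
        simp [outA, List.takeWhile_cons, List.dropWhile_cons, restPart]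
    · have hq' := not_or.mp hq
      by_cases hs : PySem.Chars.isspace c = true <;>
        simp [outA, hq, hq'.1, hq'.2, hs, ih, List.takeWhile_cons,
          List.dropWhile_cons, List.filter_cons]

theorem outA_eq_bGo (cs : List Char) : bGo cs = outA cs := by
  induction cs using bGo.induct with
  | case1 cs h =>
    rw [bGo]; simp only [h]
    rw [outA_split cs, h]; simp [restPart]
  | case2 cs q tail h p ih =>
    have ih' : bGo (bFindClose q tail).2 = outA (bFindClose q tail).2 := ih
    rw [bGo]; simp only [h]
    rw [outA_split cs, h]
    simp [restPart, insA_eq_bFindClose, ih']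

-- ===== VERDICT (by name: the statement is the Claim_ definition above) =====
theorem collapse_ws_outside_strings_py_spec : Claim_equal_collapse_ws_outside_strings_py := by
  intro text _
  unfold Spec_collapse_ws_outside_strings_py collapse_ws_outside_strings_py
    collapse_ws_outside_strings_py_alt
  rw [(foldl_aStep_char text.toList).1 [] ' ', outA_eq_bGo]
  simp
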